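-- pv_equiv track=rewrite | github.com/sowmya1811d/Nervesparks | src/learning_path/planner.py | _group_content_by_subject_and_difficulty
-- ===== SOURCE A (Python) =====
-- from typing import List, Dict, Any, Optional
--
-- def _group_content_by_subject_and_difficulty(
--                                             content: List[Dict[str, Any]]) -> Dict[str, Dict[str, List[Dict[str, Any]]]]:
--     """Group content by subject and difficulty level."""
--     groups = {}
--
--     for item in content:
--         subject = item['metadata'].get('subject', 'general')
--         difficulty = item['metadata'].get('difficulty_level', 'intermediate')
--
--         if subject not in groups:
--             groups[subject] = {}
--
--         if difficulty not in groups[subject]: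
--             groups[subject][difficulty] = []
--
--         groups[subject][difficulty].append(item)
--
--     return groups
-- ===== SOURCE B (Python) =====
-- def _group_content_by_subject_and_difficulty(content):
--     """Group content by subject and difficulty level (two grouping passes)."""
--     def _group_by(key_of, items):
--         groups = {}
--         for item in items:
--             k = key_of(item)
--             groups.setdefault(k, []).append(item)
--         return groups
--
--     def _subject(item):
--         return item['metadata'].get('subject', 'general')
--
--     def _difficulty(item):
--         return item['metadata'].get('difficulty_level', 'intermediate')
--
--     by_subject = _group_by(_subject, content)
--     return {subject: _group_by(_difficulty, items)
--             for subject, items in by_subject.items()}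
-- ===== Notes on version B (the rewrite author's own statement) =====
-- stated objective: simpler
-- what changed: Replaces A's single interleaved loop that grows a nested dict with key-presence checks by two flat grouping passes through one generic _group_by helper: first group items by subject, then group each subject's list by difficulty.
import Mathlib
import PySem

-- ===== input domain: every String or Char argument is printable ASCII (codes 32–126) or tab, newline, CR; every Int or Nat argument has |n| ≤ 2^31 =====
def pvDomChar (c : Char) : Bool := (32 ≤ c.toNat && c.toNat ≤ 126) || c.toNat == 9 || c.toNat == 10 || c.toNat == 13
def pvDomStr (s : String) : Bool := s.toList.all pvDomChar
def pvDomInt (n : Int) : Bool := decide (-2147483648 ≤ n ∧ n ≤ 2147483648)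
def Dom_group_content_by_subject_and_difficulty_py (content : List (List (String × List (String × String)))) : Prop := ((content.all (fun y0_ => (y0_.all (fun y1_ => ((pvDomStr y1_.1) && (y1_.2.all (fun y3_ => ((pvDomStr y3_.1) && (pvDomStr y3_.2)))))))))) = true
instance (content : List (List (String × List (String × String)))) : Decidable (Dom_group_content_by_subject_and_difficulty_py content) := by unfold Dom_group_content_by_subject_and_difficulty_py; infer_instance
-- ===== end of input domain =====

-- B replaces A's single interleaved nested-dict loop by two flat grouping passes through one
-- generic _group_by helper (group by subject, then group each subject's items by difficulty);
-- same cost, simpler decomposition.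

-- shared accessors (both Pythons evaluate item['metadata'].get(...) the same way).
-- item['metadata'] raises KeyError when absent; Pre_ excludes that, so the [] default is never used inside Pre_.
def pvMeta (item : List (String × List (String × String))) : List (String × String) :=
  (PySem.Dict.mk item).getD "metadata" []

def pvSubject (item : List (String × List (String × String))) : String :=
  (PySem.Dict.mk (pvMeta item)).getD "subject" "general"

def pvDifficulty (item : List (String × List (String × String))) : String :=
  (PySem.Dict.mk (pvMeta item)).getD "difficulty_level" "intermediate"

-- ===== PORT A =====
-- one loop body of A: presence checks, create-if-missing, then append
def pvStepA (groups : PySem.Dict String (PySem.Dict String (List (List (String × List (String × String))))))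
    (item : List (String × List (String × String))) :
    PySem.Dict String (PySem.Dict String (List (List (String × List (String × String))))) :=
  let subject := pvSubject item
  let difficulty := pvDifficulty item
  let groups := if groups.contains subject then groups else groups.insert subject PySem.Dict.empty
  let inner := groups.getD subject PySem.Dict.empty
  let inner := if inner.contains difficulty then inner else inner.insert difficulty []
  let inner := inner.insert difficulty (inner.getD difficulty [] ++ [item])  -- .append(item)
  groups.insert subject inner

def group_content_by_subject_and_difficulty_py (content : List (List (String × List (String × String)))) : List (String × List (String × List (List (String × List (String × String))))) :=
  ((content.foldl pvStepA PySem.Dict.empty).items).map (fun p => (p.1, p.2.items))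

-- ===== PORT B =====
-- B's generic _group_by: groups.setdefault(k, []).append(item) ≡ insert k (getD k [] ++ [item])
def pvGroupBy (keyOf : List (String × List (String × String)) → String)
    (items : List (List (String × List (String × String)))) :
    PySem.Dict String (List (List (String × List (String × String)))) :=
  items.foldl (fun d it => d.insert (keyOf it) (d.getD (keyOf it) [] ++ [it])) PySem.Dict.empty

def group_content_by_subject_and_difficulty_py_alt (content : List (List (String × List (String × String)))) : List (String × List (String × List (List (String × List (String × String))))) :=
  ((pvGroupBy pvSubject content).items).map
    (fun p => (p.1, (pvGroupBy pvDifficulty p.2).items))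

-- ===== PRECONDITION & SPEC =====
-- Pre_ excludes exactly the inputs where A raises KeyError: an item without a 'metadata' key.
def Pre_group_content_by_subject_and_difficulty_py (content : List (List (String × List (String × String)))) : Prop :=
  content.all (fun item => (PySem.Dict.mk item).contains "metadata") = true
instance (content : List (List (String × List (String × String)))) : Decidable (Pre_group_content_by_subject_and_difficulty_py content) := by unfold Pre_group_content_by_subject_and_difficulty_py; infer_instance

def pvWitness_group_content_by_subject_and_difficulty_py : (List (List (String × List (String × String)))) :=
  [[("metadata", [("subject", "math"), ("difficulty_level", "easy")])],
   [("metadata", [])]]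

-- instance search cannot build DecidableEq for this deeply nested type in one go; assemble it in layers
def pvDecEqItems : DecidableEq (List (List (String × List (String × String)))) := by infer_instance
def pvDecEqInner : DecidableEq (List (String × List (List (String × List (String × String))))) :=
  @instDecidableEqList _ (@instDecidableEqProd _ _ inferInstance pvDecEqItems)
def pvDecEqOut : DecidableEq (List (String × List (String × List (List (String × List (String × String)))))) :=
  @instDecidableEqList _ (@instDecidableEqProd _ _ inferInstance pvDecEqInner)

def Spec_group_content_by_subject_and_difficulty_py (content : List (List (String × List (String × String)))) (out : List (String × List (String × List (List (String × List (String × String)))))) : Prop := out = group_content_by_subject_and_difficulty_py_alt content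
instance (content : List (List (String × List (String × String)))) (out : List (String × List (String × List (List (String × List (String × String)))))) : Decidable (Spec_group_content_by_subject_and_difficulty_py content out) := by unfold Spec_group_content_by_subject_and_difficulty_py; exact pvDecEqOut out _

-- ===== CLAIM (what is proved, stated in full; the proofs are below) =====
def Claim_equal_group_content_by_subject_and_difficulty_py : Prop := ∀ (content : List (List (String × List (String × String)))), Dom_group_content_by_subject_and_difficulty_py content → Pre_group_content_by_subject_and_difficulty_py content → Spec_group_content_by_subject_and_difficulty_py content (group_content_by_subject_and_difficulty_py content)

-- ===== LEMMAS AND PROOFS =====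

-- map a function over the values of a dict, keys and order untouched
def pvMapVals {α β : Type} (g : α → β) (d : PySem.Dict String α) : PySem.Dict String β :=
  PySem.Dict.mk (d.items.map (fun p => (p.1, g p.2)))

theorem pv_get?_mapVals {α β : Type} (g : α → β) (l : List (String × α)) (k : String) :
    (PySem.Dict.mk (l.map (fun p => (p.1, g p.2)))).get? k = ((PySem.Dict.mk l).get? k).map g := by
  induction l with
  | nil => simp [PySem.Dict.get?]
  | cons p t ih =>
      obtain ⟨k1, v1⟩ := p
      by_cases h : k1 == k
      · simp [PySem.Dict.get?_mk_cons, h]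
      · simp [PySem.Dict.get?_mk_cons, h, ih]

theorem pv_contains_mapVals {α β : Type} (g : α → β) (d : PySem.Dict String α) (k : String) :
    (pvMapVals g d).contains k = d.contains k := by
  rw [PySem.Dict.contains_eq_isSome_get?, PySem.Dict.contains_eq_isSome_get?]
  show ((PySem.Dict.mk (d.items.map (fun p => (p.1, g p.2)))).get? k).isSome = _
  rw [pv_get?_mapVals]
  cases (PySem.Dict.mk d.items).get? k <;> rfl

theorem pv_getD_mapVals {α β : Type} (g : α → β) (d : PySem.Dict String α) (k : String) (dflt : α) :
    (pvMapVals g d).getD k (g dflt) = g (d.getD k dflt) := by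
  rw [PySem.Dict.getD_eq_get?_getD, PySem.Dict.getD_eq_get?_getD]
  show ((PySem.Dict.mk (d.items.map (fun p => (p.1, g p.2)))).get? k).getD _ = _
  rw [pv_get?_mapVals]
  cases (PySem.Dict.mk d.items).get? k <;> rfl

theorem pv_insert_mapVals {α β : Type} (g : α → β) (d : PySem.Dict String α) (k : String) (v : α) :
    pvMapVals g (d.insert k v) = (pvMapVals g d).insert k (g v) := by
  apply PySem.Dict.ext
  show (d.insert k v).items.map _ = ((pvMapVals g d).insert k (g v)).items
  rw [PySem.Dict.items_insert, PySem.Dict.items_insert, pv_contains_mapVals]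
  by_cases h : d.contains k
  · simp only [h, if_true]
    show _ = (d.items.map (fun p => (p.1, g p.2))).map _
    rw [List.map_map, List.map_map]
    apply List.map_congr_left
    intro p _
    by_cases hk : p.1 = k <;> simp [hk]
  · simp only [h, Bool.false_eq_true, if_false]
    show _ = d.items.map (fun p => (p.1, g p.2)) ++ _
    simp

-- named pieces of pvStepA's let-chain (proof bookkeeping only)
def pvG1 (g : PySem.Dict String (PySem.Dict String (List (List (String × List (String × String))))))
    (it : List (String × List (String × String))) :
    PySem.Dict String (PySem.Dict String (List (List (String × List (String × String))))) :=
  if g.contains (pvSubject it) then g else g.insert (pvSubject it) PySem.Dict.empty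

def pvI1 (g : PySem.Dict String (PySem.Dict String (List (List (String × List (String × String))))))
    (it : List (String × List (String × String))) :
    PySem.Dict String (List (List (String × List (String × String)))) :=
  if ((pvG1 g it).getD (pvSubject it) PySem.Dict.empty).contains (pvDifficulty it)
  then (pvG1 g it).getD (pvSubject it) PySem.Dict.empty
  else ((pvG1 g it).getD (pvSubject it) PySem.Dict.empty).insert (pvDifficulty it) []

theorem pvStepA_explicit (g : PySem.Dict String (PySem.Dict String (List (List (String × List (String × String))))))
    (it : List (String × List (String × String))) :
    pvStepA g it = (pvG1 g it).insert (pvSubject it)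
      ((pvI1 g it).insert (pvDifficulty it) ((pvI1 g it).getD (pvDifficulty it) [] ++ [it])) := rfl

theorem pv_inner_step (inner : PySem.Dict String (List (List (String × List (String × String)))))
    (t : String) (item : List (String × List (String × String))) :
    (if inner.contains t then inner else inner.insert t []).insert t
        ((if inner.contains t then inner else inner.insert t []).getD t [] ++ [item])
      = inner.insert t (inner.getD t [] ++ [item]) := by
  by_cases h : inner.contains t
  · simp [h]
  · simp only [h, Bool.false_eq_true, if_false]
    rw [PySem.Dict.getD_insert_self, PySem.Dict.insert_insert_self,
        PySem.Dict.getD_of_not_contains _ _ (by simpa using h)]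

theorem pv_groupBy_concat (keyOf : List (String × List (String × String)) → String)
    (l : List (List (String × List (String × String)))) (x : List (String × List (String × String))) :
    pvGroupBy keyOf (l ++ [x]) =
      (pvGroupBy keyOf l).insert (keyOf x) ((pvGroupBy keyOf l).getD (keyOf x) [] ++ [x]) := by
  simp [pvGroupBy, List.foldl_append]

-- A's loop step is B's subject-grouping step, seen through grouping the values by difficulty
theorem pv_stepA_eq (gB : PySem.Dict String (List (List (String × List (String × String)))))
    (item : List (String × List (String × String))) :
    pvStepA (pvMapVals (pvGroupBy pvDifficulty) gB) item =
      pvMapVals (pvGroupBy pvDifficulty)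
        (gB.insert (pvSubject item) (gB.getD (pvSubject item) [] ++ [item])) := by
  rw [pv_insert_mapVals, pvStepA_explicit]
  have hinner : (pvMapVals (pvGroupBy pvDifficulty) gB).getD (pvSubject item) PySem.Dict.empty
      = pvGroupBy pvDifficulty (gB.getD (pvSubject item) []) := by
    have := pv_getD_mapVals (pvGroupBy pvDifficulty) gB (pvSubject item) []
    simpa [pvGroupBy] using this
  by_cases h : gB.contains (pvSubject item)
  · have hg1 : pvG1 (pvMapVals (pvGroupBy pvDifficulty) gB) item = pvMapVals (pvGroupBy pvDifficulty) gB := by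
      simp [pvG1, pv_contains_mapVals, h]
    have hi0 : (pvG1 (pvMapVals (pvGroupBy pvDifficulty) gB) item).getD (pvSubject item) PySem.Dict.empty
        = pvGroupBy pvDifficulty (gB.getD (pvSubject item) []) := by rw [hg1, hinner]
    have hI1 : pvI1 (pvMapVals (pvGroupBy pvDifficulty) gB) item
        = (if (pvGroupBy pvDifficulty (gB.getD (pvSubject item) [])).contains (pvDifficulty item)
           then pvGroupBy pvDifficulty (gB.getD (pvSubject item) [])
           else (pvGroupBy pvDifficulty (gB.getD (pvSubject item) [])).insert (pvDifficulty item) []) := by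
      simp only [pvI1, hi0]
    rw [hg1, hI1, pv_inner_step, ← pv_groupBy_concat]
  · have hc : (pvMapVals (pvGroupBy pvDifficulty) gB).contains (pvSubject item) = false := by
      rw [pv_contains_mapVals]; simpa using h
    have hg1 : pvG1 (pvMapVals (pvGroupBy pvDifficulty) gB) item
        = (pvMapVals (pvGroupBy pvDifficulty) gB).insert (pvSubject item) PySem.Dict.empty := by
      simp [pvG1, hc]
    have hi0 : (pvG1 (pvMapVals (pvGroupBy pvDifficulty) gB) item).getD (pvSubject item) PySem.Dict.empty
        = PySem.Dict.empty := by rw [hg1, PySem.Dict.getD_insert_self]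
    have hI1 : pvI1 (pvMapVals (pvGroupBy pvDifficulty) gB) item
        = (PySem.Dict.empty : PySem.Dict String (List (List (String × List (String × String))))).insert (pvDifficulty item) [] := by
      simp only [pvI1, hi0]
      simp [PySem.Dict.contains_empty]
    have hits : gB.getD (pvSubject item) [] = [] :=
      PySem.Dict.getD_of_not_contains _ _ (by simpa using h)
    rw [hg1, hI1, hits, PySem.Dict.getD_insert_self, PySem.Dict.insert_insert_self,
        PySem.Dict.insert_insert_self]
    rfl

theorem pv_fold_eq (content : List (List (String × List (String × String))))
    (gB : PySem.Dict String (List (List (String × List (String × String))))) :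
    content.foldl pvStepA (pvMapVals (pvGroupBy pvDifficulty) gB) =
      pvMapVals (pvGroupBy pvDifficulty)
        (content.foldl (fun d it => d.insert (pvSubject it) (d.getD (pvSubject it) [] ++ [it])) gB) := by
  induction content generalizing gB with
  | nil => rfl
  | cons x t ih =>
      simp only [List.foldl_cons]
      rw [pv_stepA_eq, ih]

-- ===== VERDICT (by name: the statement is the Claim_ definition above) =====
theorem group_content_by_subject_and_difficulty_py_spec : Claim_equal_group_content_by_subject_and_difficulty_py := by
  intro content _ _
  unfold Spec_group_content_by_subject_and_difficulty_py
  unfold group_content_by_subject_and_difficulty_py group_content_by_subject_and_difficulty_py_alt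
  have h0 : (PySem.Dict.empty : PySem.Dict String (PySem.Dict String (List (List (String × List (String × String))))))
      = pvMapVals (pvGroupBy pvDifficulty) PySem.Dict.empty := rfl
  rw [h0, pv_fold_eq]
  show ((content.foldl _ PySem.Dict.empty).items.map (fun p => (p.1, pvGroupBy pvDifficulty p.2))).map _ = _
  rw [List.map_map]
  rfl
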